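-- pv_equiv track=rewrite | github.com/YccWoo/learn_python | src/leetcode/chapter7.py | can_be_composed
-- ===== SOURCE A (Python) =====
-- def can_be_composed(word1,world2):
--     for i in word1:
--         if i in world2:
--             world2 = world2.replace(i,"",1)
--             continue
--         else:
--             return False
--     return True
-- ===== SOURCE B (Python) =====
-- def can_be_composed(word1, world2):
--     cnt = {}
--     for ch in world2:
--         cnt[ch] = cnt.get(ch, 0) + 1
--     for ch in word1:
--         if cnt.get(ch, 0) > 0:
--             cnt[ch] = cnt[ch] - 1
--         else:
--             return False
--     return True
-- ===== Notes on version B (the rewrite author's own statement) =====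
-- stated objective: faster
-- what changed: Replaces the per-character substring scan and string-rebuilding replace() with a character-count dictionary built once over world2 and decremented while scanning word1.
import Mathlib
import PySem

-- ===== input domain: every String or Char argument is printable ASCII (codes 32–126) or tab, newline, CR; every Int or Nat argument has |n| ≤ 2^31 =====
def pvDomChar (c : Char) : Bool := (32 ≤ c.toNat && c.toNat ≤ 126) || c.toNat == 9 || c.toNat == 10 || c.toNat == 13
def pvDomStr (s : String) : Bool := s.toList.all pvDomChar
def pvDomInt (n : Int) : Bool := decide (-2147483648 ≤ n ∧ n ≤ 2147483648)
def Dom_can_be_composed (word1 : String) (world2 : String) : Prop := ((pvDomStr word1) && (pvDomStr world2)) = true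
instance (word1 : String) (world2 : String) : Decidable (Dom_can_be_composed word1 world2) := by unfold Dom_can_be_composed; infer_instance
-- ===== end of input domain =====

-- B replaces A's repeated 'in'/replace scans over a shrinking string by a character-count
-- dictionary built once over world2 and decremented while scanning word1 (objective: faster).

-- ===== PORT A =====
-- world2.replace(i, "", 1) for the single character i: remove the first occurrence of i
-- (exact for a one-character pattern; hand port since PySem.Chars.replace has no count arg)
def pvRemoveFirst : List Char → Char → List Char
  | [], _ => []
  | x :: xs, c => if x == c then xs else x :: pvRemoveFirst xs c

def pvGoA : List Char → List Char → Bool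
  | [], _ => true
  | c :: rest, w =>
      if PySem.Chars.isIn [c] w then pvGoA rest (pvRemoveFirst w c)
      else false

def can_be_composed (word1 : String) (world2 : String) : Bool :=
  pvGoA word1.toList world2.toList

-- ===== PORT B =====
-- second loop of Source B: cnt.get(ch,0) > 0 test, then cnt[ch] = cnt[ch] - 1
def pvGoB : List Char → PySem.Dict Char Int → Bool
  | [], _ => true
  | c :: rest, d =>
      if d.getD c 0 > 0 then pvGoB rest (d.insert c (d.getD c 0 - 1))
      else false

def can_be_composed_alt (word1 : String) (world2 : String) : Bool :=
  -- first loop of Source B: cnt[ch] = cnt.get(ch, 0) + 1 over world2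
  pvGoB word1.toList
    (world2.toList.foldl (fun d ch => d.insert ch (d.getD ch 0 + 1)) PySem.Dict.empty)

-- ===== PRECONDITION & SPEC =====
def Spec_can_be_composed (word1 : String) (world2 : String) (out : Bool) : Prop := out = can_be_composed_alt word1 world2
instance (word1 : String) (world2 : String) (out : Bool) : Decidable (Spec_can_be_composed word1 world2 out) := by unfold Spec_can_be_composed; infer_instance

-- ===== CLAIM (what is proved, stated in full; the proofs are below) =====
def Claim_equal_can_be_composed : Prop := ∀ (word1 : String) (world2 : String), Dom_can_be_composed word1 world2 → Spec_can_be_composed word1 world2 (can_be_composed word1 world2)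

-- ===== LEMMAS AND PROOFS =====

theorem pvRemoveFirst_eq_erase (w : List Char) (c : Char) : pvRemoveFirst w c = w.erase c := by
  induction w with
  | nil => rfl
  | cons x xs ih =>
      simp only [pvRemoveFirst, List.erase_cons, ih]

theorem isIn_singleton_iff (c : Char) (w : List Char) :
    PySem.Chars.isIn [c] w = true ↔ c ∈ w := by
  rw [PySem.Chars.isIn_iff_infix]
  constructor
  · intro h
    have := h.sublist
    simpa using this
  · intro h
    obtain ⟨l, r, rfl⟩ := List.mem_iff_append.mp (by simpa using h)
    exact ⟨l, r, by simp⟩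

theorem pvGo_eq (w1 : List Char) :
    ∀ (w : List Char) (d : PySem.Dict Char Int),
      (∀ c, d.getD c 0 = (w.count c : Int)) → pvGoA w1 w = pvGoB w1 d := by
  induction w1 with
  | nil => intro w d _; rfl
  | cons c rest ih =>
      intro w d hinv
      simp only [pvGoA, pvGoB]
      have hmem : PySem.Chars.isIn [c] w = true ↔ d.getD c 0 > 0 := by
        rw [isIn_singleton_iff, hinv c]
        exact_mod_cast List.count_pos_iff.symm
      by_cases h : c ∈ w
      · have hin : PySem.Chars.isIn [c] w = true := (isIn_singleton_iff c w).mpr h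
        have hd : d.getD c 0 > 0 := hmem.mp hin
        rw [hin, if_pos hd]
        apply ih
        intro x
        by_cases hx : x = c
        · subst hx
          rw [PySem.Dict.getD_insert, pvRemoveFirst_eq_erase, hinv x,
              List.count_erase_self, if_pos rfl]
          have : 1 ≤ w.count x := List.count_pos_iff.mpr h
          push_cast [Nat.cast_sub this]
          ring
        · rw [PySem.Dict.getD_insert_of_ne d _ _ hx,
              pvRemoveFirst_eq_erase, hinv x, List.count_erase_of_ne hx]
      · have hin : PySem.Chars.isIn [c] w = false := by
          rw [← Bool.not_eq_true, isIn_singleton_iff]; exact h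
        have hd : ¬ d.getD c 0 > 0 := fun hp => h ((isIn_singleton_iff c w).mp (hmem.mpr hp))
        rw [hin, if_neg hd]
        simp

-- ===== VERDICT (by name: the statement is the Claim_ definition above) =====
theorem can_be_composed_spec : Claim_equal_can_be_composed := by
  intro word1 world2 _
  unfold Spec_can_be_composed can_be_composed can_be_composed_alt
  apply pvGo_eq
  intro c
  rw [PySem.Dict.foldl_insert_getD_add_one_eq_counter, PySem.Dict.getD_counter]
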